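-- pv_equiv track=rewrite | github.com/wesley-cantarino/character_counter | crypt.py | isWorld
-- ===== SOURCE A (Python) =====
-- def isWorld (read):
--     for i in range(65, 91):  # maiusculo
--         if read == chr(i):
--             return True
--     for i in range(97, 123):  # maiusculo
--         if read == chr(i):
--             return True
--
--     return False
-- ===== SOURCE B (Python) =====
-- def isWorld(read):
--     return (isinstance(read, str) and len(read) == 1
--             and ('A' <= read <= 'Z' or 'a' <= read <= 'z'))
-- ===== Notes on version B (the rewrite author's own statement) =====
-- stated objective: simpler
-- what changed: Replaces the two 26-iteration scanning loops over the uppercase and lowercase ASCII letter codes with a single closed-form test: the input is a length-1 string whose character lies in one of the two ASCII letter ranges.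
import Mathlib
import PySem

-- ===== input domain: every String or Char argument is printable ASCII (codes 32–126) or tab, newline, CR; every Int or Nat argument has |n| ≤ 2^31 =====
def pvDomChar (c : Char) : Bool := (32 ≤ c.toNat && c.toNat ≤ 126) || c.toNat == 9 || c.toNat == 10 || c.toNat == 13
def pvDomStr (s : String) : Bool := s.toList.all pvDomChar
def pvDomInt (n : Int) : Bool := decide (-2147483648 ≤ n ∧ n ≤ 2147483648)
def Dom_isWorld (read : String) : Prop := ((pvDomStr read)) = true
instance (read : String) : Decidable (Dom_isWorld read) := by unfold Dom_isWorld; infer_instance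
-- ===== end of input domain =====

-- B replaces A's two 26-iteration scanning loops by one closed-form length-1 ASCII-letter test (objective: simpler).

-- ===== PORT A =====
-- the body of each 'for i in range(..): if read == chr(i): return True' loop;
-- chr(i) for i in 65..122 is ported as String.ofList [Char.ofNat i.toNat] (exact on that range)
def isWorldLoop (read : String) : List Int → Bool
  | [] => false
  | i :: rest => if read == String.ofList [Char.ofNat i.toNat] then true else isWorldLoop read rest

def isWorld (read : String) : Bool :=
  if isWorldLoop read (PySem.List.pyRange 65 91 1) then true
  else if isWorldLoop read (PySem.List.pyRange 97 123 1) then true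
  else false

-- ===== PORT B =====
def isWorld_alt (read : String) : Bool :=
  match read.toList with
  | [c] => ('A' ≤ c && c ≤ 'Z') || ('a' ≤ c && c ≤ 'z')
  | _ => false

-- ===== PRECONDITION & SPEC =====
def Spec_isWorld (read : String) (out : Bool) : Prop := out = isWorld_alt read
instance (read : String) (out : Bool) : Decidable (Spec_isWorld read out) := by unfold Spec_isWorld; infer_instance

-- ===== CLAIM (what is proved, stated in full; the proofs are below) =====
def Claim_equal_isWorld : Prop := ∀ (read : String), Dom_isWorld read → Spec_isWorld read (isWorld read)

-- ===== LEMMAS AND PROOFS =====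

theorem isWorldLoop_eq_true_iff (read : String) (l : List Int) :
    isWorldLoop read l = true ↔ ∃ i ∈ l, read.toList = [Char.ofNat i.toNat] := by
  induction l with
  | nil => simp [isWorldLoop]
  | cons i rest ih =>
    simp only [isWorldLoop]
    split_ifs with h
    · simp only [true_iff]
      refine ⟨i, List.mem_cons_self, ?_⟩
      have := beq_iff_eq.mp h
      rw [this]; simp
    · rw [ih]
      constructor
      · rintro ⟨j, hj, hr⟩; exact ⟨j, List.mem_cons_of_mem _ hj, hr⟩
      · rintro ⟨j, hj, hr⟩
        rcases List.mem_cons.mp hj with rfl | hj'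
        · exfalso; apply h; apply beq_iff_eq.mpr
          have h2 : String.ofList read.toList = read := by simp
          rw [hr] at h2; exact h2.symm
        · exact ⟨j, hj', hr⟩

theorem isWorld_eq_true_iff (read : String) :
    isWorld read = true ↔ ∃ c, read.toList = [c] ∧
      ((65 ≤ c.toNat ∧ c.toNat ≤ 90) ∨ (97 ≤ c.toNat ∧ c.toNat ≤ 122)) := by
  unfold isWorld
  constructor
  · intro h
    split_ifs at h with h1 h2
    · obtain ⟨i, hi, hr⟩ := (isWorldLoop_eq_true_iff _ _).mp h1
      rw [PySem.List.mem_pyRange_one] at hi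
      refine ⟨Char.ofNat i.toNat, hr, Or.inl ?_⟩
      have hv : (Char.ofNat i.toNat).toNat = i.toNat := by
        rw [Char.toNat_ofNat, if_pos (Or.inl (by omega))]
      omega
    · obtain ⟨i, hi, hr⟩ := (isWorldLoop_eq_true_iff _ _).mp h2
      rw [PySem.List.mem_pyRange_one] at hi
      refine ⟨Char.ofNat i.toNat, hr, Or.inr ?_⟩
      have hv : (Char.ofNat i.toNat).toNat = i.toNat := by
        rw [Char.toNat_ofNat, if_pos (Or.inl (by omega))]
      omega
  · rintro ⟨c, hr, hc⟩
    have hkey : ∀ a b : Int, a ≤ (c.toNat : Int) → ((c.toNat : Int)) < b →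
        isWorldLoop read (PySem.List.pyRange a b 1) = true := by
      intro a b ha hb
      apply (isWorldLoop_eq_true_iff _ _).mpr
      refine ⟨(c.toNat : Int), PySem.List.mem_pyRange_one.mpr ⟨ha, hb⟩, ?_⟩
      rw [hr, Int.toNat_natCast, Char.ofNat_toNat]
    rcases hc with ⟨h1, h2⟩ | ⟨h1, h2⟩
    · split_ifs with hA hB
      · rfl
      · exact absurd (hkey 65 91 (by omega) (by omega)) hA
      · exact absurd (hkey 65 91 (by omega) (by omega)) hA
    · split_ifs with hA hB
      · rfl
      · rfl
      · exact absurd (hkey 97 123 (by omega) (by omega)) hB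

theorem isWorld_alt_eq_true_iff (read : String) :
    isWorld_alt read = true ↔ ∃ c, read.toList = [c] ∧
      ((65 ≤ c.toNat ∧ c.toNat ≤ 90) ∨ (97 ≤ c.toNat ∧ c.toNat ≤ 122)) := by
  unfold isWorld_alt
  rcases hl : read.toList with _ | ⟨c, _ | ⟨d, tl⟩⟩
  · simp
  · simp only [Bool.or_eq_true, Bool.and_eq_true, decide_eq_true_eq]
    constructor
    · intro h
      refine ⟨c, rfl, ?_⟩
      rcases h with ⟨hA, hZ⟩ | ⟨ha, hz⟩
      · exact Or.inl ⟨hA, hZ⟩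
      · exact Or.inr ⟨ha, hz⟩
    · rintro ⟨c', hc', h⟩
      obtain rfl : c = c' := by injection hc'
      rcases h with ⟨hA, hZ⟩ | ⟨ha, hz⟩
      · exact Or.inl ⟨hA, hZ⟩
      · exact Or.inr ⟨ha, hz⟩
  · simp

-- ===== VERDICT (by name: the statement is the Claim_ definition above) =====
theorem isWorld_spec : Claim_equal_isWorld := by
  intro read _
  show isWorld read = isWorld_alt read
  have := (isWorld_eq_true_iff read).trans (isWorld_alt_eq_true_iff read).symm
  rcases hB : isWorld_alt read with _ | _
  · rcases hA : isWorld read with _ | _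
    · rfl
    · rw [hA, hB] at this; simp at this
  · exact this.mpr hB
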